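-- pv_equiv track=rewrite | github.com/BewineLog/coding_test_code-python | 무지의먹방라이브.py | solution
-- ===== SOURCE A (Python) =====
-- import heapq
--
-- def solution(food_times, k):
--     answer = 0
--     q = []
--
--     if sum(food_times) <= k:
--         return -1
--
--     for i in range(len(food_times)):
--         heapq.heappush(q,(food_times[i],i+1))
--
--     sum_value = 0 #먹기 위해서 사용한 시간
--     previous = 0 #직전에 다 먹은 음식 시간
--     length = len(food_times) #남은 음식의 갯수
--
--     while (sum_value + length*(q[0][0] - previous)) <=k:
--         now = heapq.heappop(q)[0]
--         sum_value += (now - previous) * length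
--         length -= 1
--         previous = now
--
--     result = sorted(q,key = lambda x: x[1])
--
--     return result[(k - sum_value) % length][1]
-- ===== SOURCE B (Python) =====
-- def solution(food_times, k):
--     total = sum(food_times)
--     if total <= k:
--         return -1
--     n = len(food_times)
--
--     def cost(t):
--         # total seconds spent if every food is eaten down to level t (cyclically)
--         return sum(min(f, t) for f in food_times)
--
--     # binary search the largest level lo with cost(lo) <= k
--     lo = min(min(food_times), k // n)   # cost(lo) = n*lo <= k
--     hi = max(food_times)                # cost(hi) = total > k
--     while hi - lo > 1:
--         mid = (lo + hi) // 2
--         if cost(mid) <= k: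
--             lo = mid
--         else:
--             hi = mid
--
--     survivors = [i for i, f in enumerate(food_times, 1) if f > lo]
--     return survivors[k - cost(lo)]
-- ===== Notes on version B (the rewrite author's own statement) =====
-- stated objective: alternative
-- what changed: replaces the heap/pop-by-pop simulation with a parametric (binary) search on the eating level T using the closed-form time function cost(T)=sum(min(f,T)): find the largest T with cost(T)<=k, then index the foods with f>T at position k-cost(T); no priority queue, no sort, no incremental (sum_value,previous,length) state
import Mathlib
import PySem

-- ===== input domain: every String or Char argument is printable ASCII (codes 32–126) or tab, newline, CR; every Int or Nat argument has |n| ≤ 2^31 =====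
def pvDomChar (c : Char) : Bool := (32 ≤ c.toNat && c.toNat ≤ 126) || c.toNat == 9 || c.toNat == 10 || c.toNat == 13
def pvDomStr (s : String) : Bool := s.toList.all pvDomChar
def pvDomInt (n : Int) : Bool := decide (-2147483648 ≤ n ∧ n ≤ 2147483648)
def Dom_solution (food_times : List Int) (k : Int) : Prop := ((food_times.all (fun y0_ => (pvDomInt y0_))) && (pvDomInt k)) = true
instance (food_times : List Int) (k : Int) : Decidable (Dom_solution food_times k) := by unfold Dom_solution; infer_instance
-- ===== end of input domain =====

-- B drops the heap/pop simulation for a binary search on the eating level T with the closed form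
-- cost(T) = Σ min(f,T) (alternative algorithm, similar cost).

-- ===== PORT A =====
-- heapq is not covered by PySem; it is ported by hand as an ordered list: heappush = ordered insert with
-- Python's tuple '<' (PySem.List.insertBy), heappop = take the head, q[0] = head. This is exact for this
-- program: the pushed pairs have pairwise distinct second components, so the tuple order is total and the
-- pop sequence and q[0] of a Python binary heap are exactly those of the ordered list.
def pvLexLt (a b : Int × Int) : Bool :=
  decide (a.1 < b.1) || (!decide (b.1 < a.1) && decide (a.2 < b.2))

def pvHeapPush (q : List (Int × Int)) (p : Int × Int) : List (Int × Int) :=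
  PySem.List.insertBy pvLexLt p q

-- the while loop: state (q, sum_value, previous, length)
def pvLoopA (k : Int) : List (Int × Int) → Int → Int → Int → Int
  | [], _, _, _ => 0  -- Python raises IndexError at q[0]; excluded by Pre_solution
  | (t, i) :: rest, sum_value, previous, length =>
    if sum_value + length * (t - previous) ≤ k then
      pvLoopA k rest (sum_value + (t - previous) * length) t (length - 1)
    else
      -- result = sorted(q, key=lambda x: x[1]); return result[(k - sum_value) % length][1]
      match PySem.List.pyGet? (PySem.List.sorted ((t, i) :: rest) (fun x => x.2))
              (PySem.Int.mod (k - sum_value) length) with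
      | some p => p.2
      | none => 0  -- Python would raise; unreachable under Pre_solution

def solution (food_times : List Int) (k : Int) : Int :=
  if food_times.sum ≤ k then -1
  else
    let q := (PySem.List.pyRange 0 (food_times.length : Int) 1).foldl
      (fun q i => pvHeapPush q (PySem.List.pyGetD food_times i 0, i + 1)) []
    pvLoopA k q 0 0 (food_times.length : Int)

-- ===== PORT B =====
-- cost(t) = sum(min(f, t) for f in food_times)
def pvCost (food_times : List Int) (t : Int) : Int :=
  (food_times.map (fun f => min f t)).sum

-- while hi - lo > 1: mid = (lo+hi)//2; lo = mid if cost(mid) <= k else hi = mid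
-- (structural fuel recursion; the fuel (hi - lo).toNat bounds the iteration count exactly, so this
--  computes precisely the Python while loop)
def pvSearchGo (food_times : List Int) (k : Int) : Nat → Int → Int → Int
  | 0, lo, _ => lo
  | fuel + 1, lo, hi =>
    if 1 < hi - lo then
      if pvCost food_times (PySem.Int.floordiv (lo + hi) 2) ≤ k then
        pvSearchGo food_times k fuel (PySem.Int.floordiv (lo + hi) 2) hi
      else
        pvSearchGo food_times k fuel lo (PySem.Int.floordiv (lo + hi) 2)
    else lo

def pvSearch (food_times : List Int) (k lo hi : Int) : Int :=
  pvSearchGo food_times k (hi - lo).toNat lo hi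

def solution_alt (food_times : List Int) (k : Int) : Int :=
  if food_times.sum ≤ k then -1
  else
    let n : Int := (food_times.length : Int)
    -- min(food_times) / max(food_times); Python raises on [] (excluded by Pre_solution)
    let mn : Int := match PySem.List.min? food_times (fun x => x) with | some v => v | none => 0
    let mx : Int := match PySem.List.max? food_times (fun x => x) with | some v => v | none => 0
    let lo := pvSearch food_times k (min mn (PySem.Int.floordiv k n)) mx
    -- survivors = [i for i, f in enumerate(food_times, 1) if f > lo]; survivors[k - cost(lo)]
    match PySem.List.pyGet?
        (((PySem.List.enumerate food_times 1).filter (fun z => decide (lo < z.2))).map (fun z => z.1))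
        (k - pvCost food_times lo) with
    | some i => i
    | none => 0  -- Python would raise; unreachable under Pre_solution

-- ===== PRECONDITION & SPEC =====
-- Pre_ excludes only the inputs where the Python A raises (empty list with k < 0: sum([]) = 0 > k, then
-- q[0] on the empty heap raises IndexError).
def Pre_solution (food_times : List Int) (k : Int) : Prop := food_times ≠ [] ∨ 0 ≤ k
instance (food_times : List Int) (k : Int) : Decidable (Pre_solution food_times k) := by
  unfold Pre_solution; infer_instance
def pvWitness_solution : List Int × Int := ([3, 1, 2], 5)

def Spec_solution (food_times : List Int) (k : Int) (out : Int) : Prop := out = solution_alt food_times k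
instance (food_times : List Int) (k : Int) (out : Int) : Decidable (Spec_solution food_times k out) := by
  unfold Spec_solution; infer_instance

-- ===== CLAIM (what is proved, stated in full; the proofs are below) =====
def Claim_equal_solution : Prop := ∀ (food_times : List Int) (k : Int), Dom_solution food_times k → Pre_solution food_times k → Spec_solution food_times k (solution food_times k)


-- ===== LEMMAS AND PROOFS =====

-- the (time, index) pairs A builds its heap from
def pvPairs (ft : List Int) : List (Int × Int) :=
  (PySem.List.enumerate ft 1).map (fun z => (z.2, z.1))

-- cost is monotone in the level
lemma pvCost_mono (ft : List Int) {a b : Int} (h : a ≤ b) : pvCost ft a ≤ pvCost ft b := by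
  induction ft with
  | nil => simp [pvCost]
  | cons f ft ih =>
    simp only [pvCost, List.map_cons, List.sum_cons] at *
    exact add_le_add (min_le_min le_rfl h) ih

lemma pvCost_const (ft : List Int) {c : Int} (h : ∀ f ∈ ft, c ≤ f) :
    pvCost ft c = (ft.length : Int) * c := by
  induction ft with
  | nil => simp [pvCost]
  | cons f ft ih =>
    simp only [pvCost, List.map_cons, List.sum_cons, List.length_cons] at *
    rw [min_eq_right (h f (by simp)), ih (fun g hg => h g (by simp [hg]))]
    push_cast
    ring

lemma pvCost_sum (ft : List Int) {c : Int} (h : ∀ f ∈ ft, f ≤ c) : pvCost ft c = ft.sum := by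
  induction ft with
  | nil => simp [pvCost]
  | cons f ft ih =>
    simp only [pvCost, List.map_cons, List.sum_cons] at *
    rw [min_eq_left (h f (by simp)), ih (fun g hg => h g (by simp [hg]))]

-- cost through any split of the pairs into "eaten" (time ≤ T) and "alive" (time ≥ T) parts
lemma pvCost_split (ft : List Int) (pops q : List (Int × Int)) (T : Int)
    (hperm : (pvPairs ft).Perm (pops ++ q))
    (hpops : ∀ x ∈ pops, x.1 ≤ T)
    (hq : ∀ x ∈ q, T ≤ x.1) :
    pvCost ft T = (pops.map Prod.fst).sum + (q.length : Int) * T := by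
  have h1 : pvCost ft T = ((pvPairs ft).map (fun z => min z.1 T)).sum := by
    unfold pvCost pvPairs
    rw [List.map_map]
    conv_lhs => rw [← PySem.List.map_snd_enumerate ft 1, List.map_map]
    rfl
  rw [h1, ((hperm.map (fun z => min z.1 T)).sum_eq :
      ((pvPairs ft).map (fun z => min z.1 T)).sum = _)]
  rw [List.map_append, List.sum_append]
  congr 1
  · apply congrArg List.sum
    apply List.map_congr_left
    intro x hx
    exact min_eq_left (hpops x hx)
  · rw [List.map_congr_left (fun x hx => min_eq_right (hq x hx) :
        ∀ x ∈ q, (fun z => min z.1 T) x = (fun _ => T) x)]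
    clear hperm hq
    induction q with
    | nil => simp
    | cons y ys ih =>
      simp only [List.map_cons, List.sum_cons, List.length_cons, ih]
      push_cast
      ring

-- the ordered-insert heap: lexicographic order facts
def pvLexLe (a b : Int × Int) : Prop := a.1 < b.1 ∨ (a.1 = b.1 ∧ a.2 ≤ b.2)

lemma pvLexLe_of_lt {a b : Int × Int} (h : pvLexLt a b = true) : pvLexLe a b := by
  simp only [pvLexLt, Bool.or_eq_true, Bool.and_eq_true, Bool.not_eq_true',
    decide_eq_true_eq, decide_eq_false_iff_not] at h
  unfold pvLexLe
  omega

lemma pvLexLe_of_not_lt {a b : Int × Int} (h : pvLexLt a b = false) : pvLexLe b a := by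
  simp only [pvLexLt, Bool.or_eq_false_iff, Bool.and_eq_false_iff, Bool.not_eq_false',
    decide_eq_true_eq, decide_eq_false_iff_not] at h
  unfold pvLexLe
  omega

lemma pvLexLe_trans {a b c : Int × Int} (h1 : pvLexLe a b) (h2 : pvLexLe b c) : pvLexLe a c := by
  unfold pvLexLe at *
  omega

lemma pvInsertBy_pairwise (x : Int × Int) (ys : List (Int × Int))
    (h : ys.Pairwise pvLexLe) : (PySem.List.insertBy pvLexLt x ys).Pairwise pvLexLe := by
  induction ys with
  | nil => simp [PySem.List.insertBy, pvLexLe]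
  | cons y ys ih =>
    rcases List.pairwise_cons.mp h with ⟨hy, hys⟩
    simp only [PySem.List.insertBy]
    by_cases hb : pvLexLt x y
    · simp only [hb, if_true]
      refine List.pairwise_cons.mpr ⟨?_, h⟩
      intro z hz
      rcases List.mem_cons.mp hz with rfl | hz
      · exact pvLexLe_of_lt hb
      · exact pvLexLe_trans (pvLexLe_of_lt hb) (hy z hz)
    · simp only [hb, if_false, Bool.false_eq_true]
      refine List.pairwise_cons.mpr ⟨?_, ih hys⟩
      intro z hz
      rcases (PySem.List.mem_insertBy pvLexLt x z ys).mp hz with rfl | hz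
      · exact pvLexLe_of_not_lt (by simpa using hb)
      · exact hy z hz

lemma pvHeapFold_pairwise (l acc : List (Int × Int)) (h : acc.Pairwise pvLexLe) :
    (l.foldl (fun q p => pvHeapPush q p) acc).Pairwise pvLexLe := by
  induction l generalizing acc with
  | nil => simpa using h
  | cons x l ih => exact ih _ (pvInsertBy_pairwise x acc h)

lemma pvEnum_getElem : ∀ (xs : List Int) (s : Int) (j : Nat) (h : j < (PySem.List.enumerate xs s).length),
    (PySem.List.enumerate xs s)[j] = (s + j, xs[j]'(by simpa [PySem.List.length_enumerate] using h)) := by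
  intro xs
  induction xs with
  | nil => intro s j h; simp [PySem.List.enumerate] at h
  | cons x xs ih =>
    intro s j h
    cases j with
    | zero => simp [PySem.List.enumerate_cons]
    | succ j =>
      simp only [PySem.List.enumerate_cons, List.getElem_cons_succ]
      rw [ih (s + 1) j (by simpa [PySem.List.length_enumerate] using Nat.lt_of_succ_lt_succ (by simpa [PySem.List.length_enumerate] using h))]
      congr 1
      push_cast; ring

lemma pvLists_eq (ft : List Int) :
    (PySem.List.pyRange 0 (ft.length : Int) 1).map
        (fun i => (PySem.List.pyGetD ft i 0, i + 1))
      = pvPairs ft := by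
  unfold pvPairs
  apply List.ext_getElem
  · simp [PySem.List.length_pyRange_one, PySem.List.length_enumerate]
  · intro j h1 h2
    have hj : j < ft.length := by
      simpa [PySem.List.length_pyRange_one] using h1
    have hr : j < (PySem.List.pyRange 0 (ft.length : Int) 1).length := by
      simpa [PySem.List.length_pyRange_one] using hj
    rw [List.getElem_map, List.getElem_map,
        PySem.List.getElem_pyRange_one (k := j) (h := hr),
        pvEnum_getElem ft 1 j (by simpa [PySem.List.length_enumerate] using hj)]
    have : PySem.List.pyGetD ft ((0 : Int) + (j : Int)) 0 = ft[j] := by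
      rw [show ((0 : Int) + (j : Int)) = (j : Int) by ring]
      simp [PySem.List.pyGetD_natCast, hj]
    rw [this]
    simp [add_comm]

-- pyGet? commutes with map
lemma pvPyGet?_map {A B : Type} (f : A → B) (l : List A) (i : Int) :
    PySem.List.pyGet? (l.map f) i = (PySem.List.pyGet? l i).map f := by
  simp only [PySem.List.pyGet?, PySem.List.pyIdx?, List.length_map]
  split
  · simp
  · simp

-- the common final expression: index (k - cost T) into the foods with time > T, in index order
def pvTarget (ft : List Int) (k T : Int) : Int :=
  match PySem.List.pyGet?
      (((PySem.List.enumerate ft 1).filter (fun z => decide (T < z.2))).map (fun z => z.1))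
      (k - pvCost ft T) with
  | some i => i
  | none => 0

-- A's while loop, from any reachable state, lands on pvTarget
lemma pvLoopA_char (ft : List Int) (k T : Int)
    (hT1 : pvCost ft T ≤ k) (hT2 : k < pvCost ft (T + 1)) :
    ∀ (q pops : List (Int × Int)) (s p : Int),
      (pvPairs ft).Perm (pops ++ q) →
      (∀ x ∈ pops, x.1 ≤ p) →
      (pops ≠ [] → ∀ x ∈ q, p ≤ x.1) →
      (pops ≠ [] → p ≤ T) →
      s = (pops.map Prod.fst).sum + (q.length : Int) * p →
      q.Pairwise (fun a b => a.1 ≤ b.1) →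
      pvLoopA k q s p (q.length : Int) = pvTarget ft k T := by
  intro q
  induction q with
  | nil =>
    intro pops s p hperm hpops hq hpT hs hpw
    exfalso
    by_cases hp0 : pops = []
    · subst hp0
      have hnil : pvPairs ft = [] := by simpa using hperm.eq_nil
      have hft : ft = [] := by
        have := congrArg List.length hnil
        simp [pvPairs, PySem.List.length_enumerate] at this
        exact this
      subst hft
      simp [pvCost] at hT1 hT2
      omega
    · have hC1 := pvCost_split ft pops [] T (by simpa using hperm)
        (fun x hx => le_trans (hpops x hx) (hpT hp0)) (by simp)
      have hC2 := pvCost_split ft pops [] (T + 1) (by simpa using hperm)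
        (fun x hx => by have := hpops x hx; have := hpT hp0; omega) (by simp)
      simp only [List.length_nil, Nat.cast_zero, zero_mul, add_zero] at hC1 hC2
      omega
  | cons hd rest ih =>
    intro pops s p hperm hpops hq hpT hs hpw
    obtain ⟨t, i⟩ := hd
    have hq_all : ∀ x ∈ (t, i) :: rest, t ≤ x.1 := by
      intro x hx
      rcases List.mem_cons.mp hx with rfl | hx
      · exact le_rfl
      · exact (List.pairwise_cons.mp hpw).1 x hx
    have hp_le_t : pops ≠ [] → p ≤ t := fun h => hq h (t, i) (by simp)
    have hcost_t : pvCost ft t = s + (((t, i) :: rest).length : Int) * (t - p) := by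
      have hsp := pvCost_split ft pops ((t, i) :: rest) t hperm
        (fun x hx => le_trans (hpops x hx) (hp_le_t (List.ne_nil_of_mem hx))) hq_all
      rw [hsp, hs]; ring
    by_cases hcond : s + (((t, i) :: rest).length : Int) * (t - p) ≤ k
    · -- pop the head and continue
      have ht_le_T : t ≤ T := by
        by_contra hlt
        push_neg at hlt
        have := pvCost_mono ft (show T + 1 ≤ t by omega)
        omega
      simp only [pvLoopA, hcond, if_true]
      have harg : (((t, i) :: rest).length : Int) - 1 = (rest.length : Int) := by
        simp only [List.length_cons]
        push_cast
        ring
      rw [harg]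
      refine ih (pops ++ [(t, i)]) (s + (t - p) * (((t, i) :: rest).length : Int)) t
        ?_ ?_ ?_ ?_ ?_ (List.pairwise_cons.mp hpw).2
      · simpa [List.append_assoc] using hperm
      · intro x hx
        rcases List.mem_append.mp hx with hx | hx
        · exact le_trans (hpops x hx) (hp_le_t (List.ne_nil_of_mem hx))
        · simp at hx; subst hx; exact le_rfl
      · intro _ x hx
        exact hq_all x (List.mem_cons_of_mem _ hx)
      · intro _; exact ht_le_T
      · rw [hs]
        simp only [List.map_append, List.sum_append, List.map_cons, List.map_nil,
          List.sum_cons, List.sum_nil, List.length_cons]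
        push_cast
        ring
    · -- stop: answer the (k - s) mod L -th remaining food
      simp only [pvLoopA, hcond, if_false]
      have hT_lt_t : T < t := by
        by_contra hle
        push_neg at hle
        have := pvCost_mono ft hle
        omega
      have hq_gt : ∀ x ∈ (t, i) :: rest, T + 1 ≤ x.1 := by
        intro x hx
        have := hq_all x hx
        omega
      have hpopsT : ∀ x ∈ pops, x.1 ≤ T :=
        fun x hx => le_trans (hpops x hx) (hpT (List.ne_nil_of_mem hx))
      have hcT := pvCost_split ft pops ((t, i) :: rest) T hperm hpopsT
        (fun x hx => by have := hq_gt x hx; omega)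
      have hcT1 := pvCost_split ft pops ((t, i) :: rest) (T + 1) hperm
        (fun x hx => by have := hpopsT x hx; omega) hq_gt
      have e1 : pvCost ft T = s + (((t, i) :: rest).length : Int) * (T - p) := by
        rw [hcT, hs]; ring
      have e2 : pvCost ft (T + 1) = pvCost ft T + (((t, i) :: rest).length : Int) := by
        rw [hcT, hcT1]; ring
      have hLpos : (0 : Int) < (((t, i) :: rest).length : Int) := by omega
      have hrem1 : 0 ≤ k - pvCost ft T := by omega
      have hrem2 : k - pvCost ft T < (((t, i) :: rest).length : Int) := by omega
      have hidx : PySem.Int.mod (k - s) (((t, i) :: rest).length : Int) = k - pvCost ft T := by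
        rw [PySem.Int.mod_eq_emod_of_pos hLpos]
        have hks : k - s = (k - pvCost ft T) + (((t, i) :: rest).length : Int) * (T - p) := by
          rw [e1]; ring
        rw [hks, Int.add_mul_emod_self_left, Int.emod_eq_of_lt hrem1 hrem2]
      have hsorted : PySem.List.sorted ((t, i) :: rest) (fun x => x.2)
          = ((PySem.List.enumerate ft 1).filter (fun z => decide (T < z.2))).map
              (fun z => (z.2, z.1)) := by
        apply PySem.List.sorted_eq_of_perm_of_pairwise_lt
        · have h1 := hperm.filter (fun z => decide (T < z.1))
          have h2 : pops.filter (fun z => decide (T < z.1)) = [] := by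
            rw [List.filter_eq_nil_iff]
            intro x hx
            have := hpopsT x hx
            simp
            omega
          have h3 : ((t, i) :: rest).filter (fun z => decide (T < z.1)) = (t, i) :: rest := by
            rw [List.filter_eq_self]
            intro x hx
            have := hq_gt x hx
            simp
            omega
          have h4 : (pvPairs ft).filter (fun z => decide (T < z.1))
              = ((PySem.List.enumerate ft 1).filter (fun z => decide (T < z.2))).map
                  (fun z => (z.2, z.1)) := by
            unfold pvPairs
            rw [List.filter_map]
            rfl
          rw [h4, List.filter_append, h2, h3] at h1
          simpa using h1
        · rw [List.pairwise_map]
          exact (PySem.List.pairwise_lt_enumerate ft 1).filter _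
      rw [hidx, hsorted, pvPyGet?_map]
      unfold pvTarget
      rw [pvPyGet?_map]
      cases PySem.List.pyGet?
          ((PySem.List.enumerate ft 1).filter (fun z => decide (T < z.2)))
          (k - pvCost ft T) with
      | none => rfl
      | some z => rfl

-- B's binary search returns the largest level with cost ≤ k
lemma pvSearch_char_aux (ft : List Int) (k : Int) :
    ∀ (N : Nat) (lo hi : Int), (hi - lo).toNat ≤ N → pvCost ft lo ≤ k → k < pvCost ft hi →
      pvCost ft (pvSearchGo ft k N lo hi) ≤ k ∧ k < pvCost ft (pvSearchGo ft k N lo hi + 1) := by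
  intro N
  induction N with
  | zero =>
    intro lo hi hN h1 h2
    have hlt : lo < hi := by
      by_contra hle
      push_neg at hle
      have := pvCost_mono ft hle
      omega
    omega
  | succ N ihN =>
    intro lo hi hN h1 h2
    have hlt : lo < hi := by
      by_contra hle
      push_neg at hle
      have := pvCost_mono ft hle
      omega
    simp only [pvSearchGo]
    by_cases hgap : 1 < hi - lo
    · have hm1 := (PySem.Int.le_floordiv_iff_mul_le (a := lo + hi) (b := 2) (q := lo + 1) (by omega)).mpr (by omega)
      have hm2 := (PySem.Int.floordiv_lt_iff_lt_mul (a := lo + hi) (b := 2) (q := hi) (by omega)).mpr (by omega)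
      rw [if_pos hgap]
      by_cases hc : pvCost ft (PySem.Int.floordiv (lo + hi) 2) ≤ k
      · rw [if_pos hc]
        exact ihN _ _ (by omega) hc h2
      · rw [if_neg hc]
        exact ihN _ _ (by omega) h1 (by omega)
    · rw [if_neg hgap]
      have hhi : hi = lo + 1 := by omega
      exact ⟨h1, by rw [← hhi]; exact h2⟩

lemma pvSearch_char (ft : List Int) (k lo hi : Int)
    (h1 : pvCost ft lo ≤ k) (h2 : k < pvCost ft hi) :
    pvCost ft (pvSearch ft k lo hi) ≤ k ∧ k < pvCost ft (pvSearch ft k lo hi + 1) :=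
  pvSearch_char_aux ft k (hi - lo).toNat lo hi le_rfl h1 h2

-- ===== VERDICT (by name: the statement is the Claim_ definition above) =====
theorem solution_spec : Claim_equal_solution := by
  intro ft k _ hpre
  unfold Spec_solution solution solution_alt
  by_cases hsum : ft.sum ≤ k
  · simp [hsum]
  · simp only [hsum, if_false]
    have hne : ft ≠ [] := by
      rcases hpre with h | h
      · exact h
      · intro h0; subst h0; simp at hsum; omega
    obtain ⟨mn, hmn⟩ : ∃ v, PySem.List.min? ft (fun x => x) = some v := by
      cases hmin : PySem.List.min? ft (fun x => x) with
      | none => exact absurd ((PySem.List.min?_eq_none_iff ft (fun x => x)).mp hmin) hne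
      | some v => exact ⟨v, rfl⟩
    obtain ⟨mx, hmx⟩ : ∃ v, PySem.List.max? ft (fun x => x) = some v := by
      cases hmax : PySem.List.max? ft (fun x => x) with
      | none => exact absurd ((PySem.List.max?_eq_none_iff ft (fun x => x)).mp hmax) hne
      | some v => exact ⟨v, rfl⟩
    have hmn_le : ∀ f ∈ ft, mn ≤ f := PySem.List.min?_isMin hmn
    have hmx_ge : ∀ f ∈ ft, f ≤ mx := PySem.List.max?_isMax hmx
    have hn : (0 : Int) < (ft.length : Int) := by
      have := List.length_pos_of_ne_nil hne
      omega
    have hlo0 : pvCost ft (min mn (PySem.Int.floordiv k (ft.length : Int))) ≤ k := by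
      rw [pvCost_const ft (fun f hf => le_trans (min_le_left _ _) (hmn_le f hf))]
      have hdm := PySem.Int.floordiv_mul_add_mod k (ft.length : Int)
      have hmnn := PySem.Int.mod_nonneg k hn
      have hdiv : (ft.length : Int) * PySem.Int.floordiv k (ft.length : Int) ≤ k := by
        have h5 : PySem.Int.floordiv k (ft.length : Int) * (ft.length : Int) ≤ k := by omega
        linarith [mul_comm (ft.length : Int) (PySem.Int.floordiv k (ft.length : Int))]
      calc (ft.length : Int) * min mn (PySem.Int.floordiv k (ft.length : Int))
          ≤ (ft.length : Int) * PySem.Int.floordiv k (ft.length : Int) :=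
            mul_le_mul_of_nonneg_left (min_le_right _ _) (le_of_lt hn)
        _ ≤ k := hdiv
    have hhi0 : k < pvCost ft mx := by
      rw [pvCost_sum ft hmx_ge]
      omega
    obtain ⟨hT1, hT2⟩ := pvSearch_char ft k (min mn (PySem.Int.floordiv k (ft.length : Int))) mx hlo0 hhi0
    have hq_eq : (PySem.List.pyRange 0 (ft.length : Int) 1).foldl
        (fun q i => pvHeapPush q (PySem.List.pyGetD ft i 0, i + 1)) []
        = (pvPairs ft).foldl (fun q p => pvHeapPush q p) [] := by
      rw [← pvLists_eq, List.foldl_map]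
    set T := pvSearch ft k (min mn (PySem.Int.floordiv k (ft.length : Int))) mx with hT
    set Q := (PySem.List.pyRange 0 (ft.length : Int) 1).foldl
        (fun q i => pvHeapPush q (PySem.List.pyGetD ft i 0, i + 1)) [] with hQ
    have hperm : Q.Perm (pvPairs ft) := by
      rw [hq_eq]
      simpa using PySem.List.foldl_insertBy_perm pvLexLt (pvPairs ft) []
    have hpw : Q.Pairwise (fun a b => a.1 ≤ b.1) := by
      rw [hq_eq]
      exact (pvHeapFold_pairwise (pvPairs ft) [] (by simp)).imp
        (fun hab => hab.elim le_of_lt (fun h' => le_of_eq h'.1))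
    have hlen : ((Q.length : Nat) : Int) = (ft.length : Int) := by
      have := hperm.length_eq
      simp [pvPairs, PySem.List.length_enumerate] at this
      omega
    have hstep : pvLoopA k Q 0 0 (ft.length : Int) = pvTarget ft k T := by
      rw [← hlen]
      exact pvLoopA_char ft k T hT1 hT2 Q [] 0 0 (by simpa using hperm.symm) (by simp)
        (fun h => absurd rfl h) (fun h => absurd rfl h) (by simp) hpw
    rw [hstep, hmn, hmx]
    try rfl
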